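-- pv_equiv track=rewrite | github.com/raeez/chiral-bar-cobar | compute/lib/cusp_form_shadow_arity.py | depth_frontier_table
-- ===== SOURCE A (Python) =====
-- from typing import Any, Dict, List, Optional, Tuple
--
-- def dim_Mk(k: int) -> int:
--     r"""Dimension of M_k(SL(2,Z)) for even k >= 0.
--
--     Standard formula:
--       dim M_0 = 1
--       dim M_2 = 0
--       dim M_k = floor(k/12) + 1  if k mod 12 != 2
--       dim M_k = floor(k/12)      if k mod 12 == 2
--     """
--     if k < 0 or k % 2 != 0:
--         return 0
--     if k == 0:
--         return 1
--     if k == 2: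
--         return 0
--     if k % 12 == 2:
--         return k // 12
--     else:
--         return k // 12 + 1
--
-- def dim_Sk(k: int) -> int:
--     r"""Dimension of S_k(SL(2,Z)) for even k >= 0.
--
--     S_k = 0 for k < 12.
--     For k >= 12: dim S_k = dim M_k - 1.
--     """
--     if k < 12:
--         return 0
--     return dim_Mk(k) - 1
--
-- def first_depth_d_lattice(d: int) -> Optional[int]:
--     r"""Find the smallest rank of an even unimodular lattice with shadow depth d.
--
--     depth d = 3 + dim S_{r/2}.
--     So we need dim S_{r/2} = d - 3.
--     Find smallest even r divisible by 8 with dim S_{r/2} >= d - 3.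
--     """
--     target_g = d - 3
--     if target_g < 0:
--         return None
--     for r in range(8, 1000, 8):
--         k = r // 2
--         if dim_Sk(k) >= target_g:
--             return r
--     return None
--
-- def depth_frontier_table(max_depth: int = 10) -> List[Dict]:
--     r"""Table of first lattice achieving each depth level.
--
--     The depth frontier: at which rank does each new depth level first appear?
--
--     depth 3: rank 8   (E_8, no cusp forms in S_4)
--     depth 4: rank 24  (Niemeier, one cusp form in S_12: Delta)
--     depth 5: rank 48  (two cusp forms in S_24)
--     depth 6: rank 72  (three cusp forms in S_36)
--     ...
--     """
--     table = []
--     for d in range(3, max_depth + 1):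
--         r = first_depth_d_lattice(d)
--         k = r // 2 if r else None
--         g_k = dim_Sk(k) if k else None
--         table.append({
--             'depth': d,
--             'first_rank': r,
--             'weight': k,
--             'dim_S_k': g_k,
--             'num_cusp_forms': d - 3,
--         })
--     return table
-- ===== SOURCE B (Python) =====
-- # Closed form: for 4|k, dim S_k = k//12 (0 below 12), so depth d first appears at
-- # rank 8 for d=3 and rank 24*(d-3) while that stays under 1000; no rank scan needed.
-- def _frontier_row(d):
--     t = d - 3
--     if t == 0:
--         r = 8
--     elif 24 * t < 1000:
--         r = 24 * t
--     else:
--         r = None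
--     if r is None:
--         return {'depth': d, 'first_rank': None, 'weight': None,
--                 'dim_S_k': None, 'num_cusp_forms': t}
--     return {'depth': d, 'first_rank': r, 'weight': r // 2,
--             'dim_S_k': t, 'num_cusp_forms': t}
--
-- def depth_frontier_table(max_depth=10):
--     return [_frontier_row(d) for d in range(3, max_depth + 1)]
-- ===== Notes on version B (the rewrite author's own statement) =====
-- stated objective: faster
-- what changed: B replaces A's per-depth scan over range(8,1000,8) (recomputing dim_Sk for each candidate rank) with a closed form: the first rank for depth d is 8 for d=3, 24*(d-3) while below 1000, else None.
import Mathlib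
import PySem

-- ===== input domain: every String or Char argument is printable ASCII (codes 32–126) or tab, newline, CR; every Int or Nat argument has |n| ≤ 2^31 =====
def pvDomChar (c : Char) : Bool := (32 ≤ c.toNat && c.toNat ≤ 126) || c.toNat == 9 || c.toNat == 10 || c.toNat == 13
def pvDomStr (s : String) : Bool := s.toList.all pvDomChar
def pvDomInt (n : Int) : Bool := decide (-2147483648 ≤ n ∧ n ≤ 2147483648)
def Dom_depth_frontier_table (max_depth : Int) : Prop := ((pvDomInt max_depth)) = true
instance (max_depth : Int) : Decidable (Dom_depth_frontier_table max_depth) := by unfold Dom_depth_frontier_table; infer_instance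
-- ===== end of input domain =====

set_option maxRecDepth 10000


-- B computes each row by closed form (first rank = 8, or 24*(d-3) while < 1000) instead of A's scan over range(8,1000,8).

-- ===== PORT A =====
def dim_Mk (k : Int) : Int :=
  if k < 0 ∨ PySem.Int.mod k 2 ≠ 0 then 0
  else if k = 0 then 1
  else if k = 2 then 0
  else if PySem.Int.mod k 12 = 2 then PySem.Int.floordiv k 12
  else PySem.Int.floordiv k 12 + 1

def dim_Sk (k : Int) : Int := if k < 12 then 0 else dim_Mk k - 1

-- the for-loop of first_depth_d_lattice with its early return
def fdlLoop (target : Int) : List Int → Option Int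
  | [] => none
  | r :: rest =>
    if dim_Sk (PySem.Int.floordiv r 2) ≥ target then some r else fdlLoop target rest

def first_depth_d_lattice (d : Int) : Option Int :=
  let target := d - 3
  if target < 0 then none
  else fdlLoop target (PySem.List.pyRange 8 1000 8)

def rowA (d : Int) : List (String × Option Int) :=
  let r := first_depth_d_lattice d
  let k : Option Int := match r with          -- `r // 2 if r else None` (truthiness: None or 0 is falsy)
    | some rv => if rv ≠ 0 then some (PySem.Int.floordiv rv 2) else none
    | none => none
  let g : Option Int := match k with          -- `dim_Sk(k) if k else None`
    | some kv => if kv ≠ 0 then some (dim_Sk kv) else none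
    | none => none
  [("depth", some d), ("first_rank", r), ("weight", k), ("dim_S_k", g),
   ("num_cusp_forms", some (d - 3))]

def depth_frontier_table (max_depth : Int) : List (List (String × Option Int)) :=
  (PySem.List.pyRange 3 (max_depth + 1) 1).foldl (fun tb d => tb ++ [rowA d]) []

-- ===== PORT B =====
def frontierRow (d : Int) : List (String × Option Int) :=
  let t := d - 3
  let r : Option Int := if t = 0 then some 8 else if 24 * t < 1000 then some (24 * t) else none
  match r with
  | none => [("depth", some d), ("first_rank", none), ("weight", none), ("dim_S_k", none),
             ("num_cusp_forms", some t)]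
  | some rv => [("depth", some d), ("first_rank", some rv),
                ("weight", some (PySem.Int.floordiv rv 2)), ("dim_S_k", some t),
                ("num_cusp_forms", some t)]

def depth_frontier_table_alt (max_depth : Int) : List (List (String × Option Int)) :=
  (PySem.List.pyRange 3 (max_depth + 1) 1).map frontierRow

-- ===== PRECONDITION & SPEC =====
def Spec_depth_frontier_table (max_depth : Int) (out : List (List (String × Option Int))) : Prop := out = depth_frontier_table_alt max_depth
instance (max_depth : Int) (out : List (List (String × Option Int))) : Decidable (Spec_depth_frontier_table max_depth out) := by unfold Spec_depth_frontier_table; infer_instance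

-- ===== CLAIM (what is proved, stated in full; the proofs are below) =====
def Claim_equal_depth_frontier_table : Prop := ∀ (max_depth : Int), Dom_depth_frontier_table max_depth → Spec_depth_frontier_table max_depth (depth_frontier_table max_depth)

-- ===== LEMMAS AND PROOFS =====

lemma fdlLoop_none (t : Int) (l : List Int)
    (h : ∀ r ∈ l, dim_Sk (PySem.Int.floordiv r 2) < t) : fdlLoop t l = none := by
  induction l with
  | nil => rfl
  | cons r rest ih =>
    have hr := h r (List.mem_cons_self ..)
    simp only [fdlLoop, if_neg (by omega : ¬ dim_Sk (PySem.Int.floordiv r 2) ≥ t)]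
    exact ih fun x hx => h x (List.mem_cons_of_mem _ hx)

lemma dims_bound : ∀ r ∈ PySem.List.pyRange 8 1000 8, dim_Sk (PySem.Int.floordiv r 2) ≤ 41 := by
  decide

lemma row_eq (d : Int) (hd : 3 ≤ d) : rowA d = frontierRow d := by
  by_cases h : d ≤ 44
  · interval_cases d <;> decide
  · have h42 : 42 ≤ d - 3 := by omega
    have hA : first_depth_d_lattice d = none := by
      unfold first_depth_d_lattice
      rw [if_neg (by omega : ¬ d - 3 < 0)]
      exact fdlLoop_none _ _ fun r hr => by have := dims_bound r hr; omega
    have hB : (if d - 3 = 0 then some (8:Int) else if 24 * (d - 3) < 1000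
        then some (24 * (d - 3)) else none) = none := by
      rw [if_neg (by omega), if_neg (by omega)]
    simp only [rowA, frontierRow, hA, hB]

lemma foldl_append_eq_map (f g : Int → List (String × Option Int)) :
    ∀ (l : List Int) (acc : List (List (String × Option Int))),
    (∀ d ∈ l, f d = g d) →
    l.foldl (fun tb d => tb ++ [f d]) acc = acc ++ l.map g := by
  intro l
  induction l with
  | nil => simp
  | cons x xs ih =>
    intro acc h
    simp only [List.foldl_cons, List.map_cons]
    rw [ih _ fun d hd => h d (List.mem_cons_of_mem _ hd), h x (List.mem_cons_self ..)]
    simp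

-- ===== VERDICT (by name: the statement is the Claim_ definition above) =====
theorem depth_frontier_table_spec : Claim_equal_depth_frontier_table := by
  intro max_depth _
  unfold Spec_depth_frontier_table depth_frontier_table depth_frontier_table_alt
  refine (foldl_append_eq_map rowA frontierRow _ [] fun d hd => ?_).trans (by simp)
  exact row_eq d ((PySem.List.mem_pyRange_one.mp hd).1)
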